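-- pv_equiv track=rewrite | github.com/fanjinfei/debug | census_crawler3.py | filter_stopindex
-- ===== SOURCE A (Python) =====
-- def filter_stopindex(content):
--     stop = '<!--stopindex-->'
--     start = '<!--startindex-->'
--     tokens = [stop, start]
--     state = 0 #keep, 1:skip
--     pos = 0
--     res = [ ]
--     def find_next( ):
--         if state == 0: return (content.find(stop, pos), 1)
--         return (content.find(start, pos), 0)
--     while True:
--         npos, nstate = find_next()
--         if npos >= 0:
--             if state == 0:
--                 res.append(content[pos:npos])
--             pos, state = npos, nstate
--         else:
--             if pos == 0: return content
--             if state == 0: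
--                 res.append(content[pos:])
--             break
--     return ''.join(res)
-- ===== SOURCE B (Python) =====
-- def filter_stopindex(content):
--     stop = '<!--stopindex-->'
--     start = '<!--startindex-->'
--     parts = content.split(stop)
--     out = [parts[0]]
--     for p in parts[1:]:
--         i = p.find(start)
--         if i >= 0:
--             out.append(p[i:])
--     return ''.join(out)
-- ===== Notes on version B (the rewrite author's own statement) =====
-- stated objective: simpler
-- what changed: Replaces the two-token state-machine scan with absolute positions by a single split on the stopindex marker followed by a per-segment search for the startindex marker.
-- intended difference: On inputs that begin with '<!--stopindex-->' and contain no '<!--startindex-->', A's 'pos == 0' no-marker shortcut misfires and returns the whole content unchanged, while B returns '' (everything after an unterminated stopindex dropped), which is the intended behaviour. — e.g. on filter_stopindex("<!--stopindex-->x"): A returns "<!--stopindex-->x", B returns ""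
import Mathlib
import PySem

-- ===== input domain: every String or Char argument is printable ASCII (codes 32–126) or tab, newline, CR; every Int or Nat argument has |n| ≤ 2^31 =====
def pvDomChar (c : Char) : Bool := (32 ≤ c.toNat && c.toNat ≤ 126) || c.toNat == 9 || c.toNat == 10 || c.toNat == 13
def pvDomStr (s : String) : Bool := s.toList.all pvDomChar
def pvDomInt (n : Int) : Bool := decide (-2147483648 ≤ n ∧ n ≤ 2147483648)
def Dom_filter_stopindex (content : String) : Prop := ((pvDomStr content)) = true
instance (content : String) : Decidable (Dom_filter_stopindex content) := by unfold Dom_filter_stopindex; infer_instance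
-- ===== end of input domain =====

-- B replaces A's two-token state machine by a split on the stopindex marker plus a
-- per-segment search for the startindex marker (simpler, same cost); on inputs that
-- begin with the stopindex marker and contain no startindex marker A's 'pos == 0'
-- shortcut returns the input unchanged while B drops the unterminated tail (D_ below).

-- ===== PORT A =====
def pvStop : List Char := "<!--stopindex-->".toList
def pvStart : List Char := "<!--startindex-->".toList

-- A's 'while True' loop; fuel is only a totality guard (2*len+3 steps always suffice).
def pvLoopA (L : List Char) (fuel : Nat) (state : Int) (pos : Int) (res : List (List Char)) : List Char :=
  match fuel with
  | 0 => []
  | fuel + 1 =>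
    let nx : Int × Int :=
      if state = 0 then (PySem.Chars.findFrom L pvStop pos, 1)
      else (PySem.Chars.findFrom L pvStart pos, 0)
    if 0 ≤ nx.1 then
      pvLoopA L fuel nx.2 nx.1
        (if state = 0 then res ++ [PySem.List.slice L (some pos) (some nx.1)] else res)
    else
      if pos = 0 then L
      else if state = 0 then PySem.Chars.join [] (res ++ [PySem.List.slice L (some pos) none])
      else PySem.Chars.join [] res

def filter_stopindex (content : String) : String :=
  String.ofList (pvLoopA content.toList (2 * content.toList.length + 3) 0 0 [])

-- ===== PORT B =====
def filter_stopindex_alt (content : String) : String :=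
  match PySem.Chars.splitOn content.toList pvStop with
  | [] => ""   -- unreachable: str.split always returns at least one piece
  | p0 :: rest =>
    String.ofList (PySem.Chars.join []
      (rest.foldl (fun out p =>
        let i := PySem.Chars.find p pvStart
        if 0 ≤ i then out ++ [PySem.List.slice p (some i) none] else out) [p0]))

-- ===== PRECONDITION & SPEC =====
-- On inputs that begin with '<!--stopindex-->' and contain no '<!--startindex-->', A's
-- 'pos == 0' no-marker shortcut misfires and returns the whole content unchanged, while
-- B returns "" (everything after the unterminated stopindex marker dropped), which is
-- the intended behaviour.
def D_filter_stopindex (content : String) : Prop :=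
  PySem.Chars.startswith content.toList pvStop = true ∧
    PySem.Chars.isIn pvStart content.toList = false
instance (content : String) : Decidable (D_filter_stopindex content) := by
  unfold D_filter_stopindex; infer_instance

def Spec_filter_stopindex (content : String) (out : String) : Prop :=
  ¬ D_filter_stopindex content → out = filter_stopindex_alt content
instance (content : String) (out : String) : Decidable (Spec_filter_stopindex content out) := by
  unfold Spec_filter_stopindex; infer_instance

def pvDiffWitness_filter_stopindex : String := "<!--stopindex-->x"
def pvDiffWitnessOut_filter_stopindex : String × String := ("<!--stopindex-->x", "")

-- ===== CLAIM (what is proved, stated in full; the proofs are below) =====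
def Claim_unchanged_filter_stopindex : Prop :=
  ∀ (content : String), Dom_filter_stopindex content →
    Spec_filter_stopindex content (filter_stopindex content)
def Claim_changed_filter_stopindex : Prop :=
  Dom_filter_stopindex (pvDiffWitness_filter_stopindex) ∧
  D_filter_stopindex (pvDiffWitness_filter_stopindex) ∧
  filter_stopindex (pvDiffWitness_filter_stopindex) = pvDiffWitnessOut_filter_stopindex.1 ∧
  filter_stopindex_alt (pvDiffWitness_filter_stopindex) = pvDiffWitnessOut_filter_stopindex.2 ∧
  pvDiffWitnessOut_filter_stopindex.1 ≠ pvDiffWitnessOut_filter_stopindex.2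
def Claim_exact_filter_stopindex : Prop :=
  ∀ (content : String), Dom_filter_stopindex content → D_filter_stopindex content →
    filter_stopindex content ≠ filter_stopindex_alt content

-- ===== LEMMAS AND PROOFS =====

-- ---- generic facts about PySem.Chars.find ----

lemma pv_prefix_getElem? {l₁ l₂ : List Char} (h : l₁ <+: l₂) {i : Nat} (hi : i < l₁.length) :
    l₂[i]? = l₁[i]? := by
  obtain ⟨t, rfl⟩ := h
  exact List.getElem?_append_left hi

lemma pv_no_occ_of_neg {u S : List Char} (h : PySem.Chars.find u S = -1) (j : Nat) :
    ¬ S <+: u.drop j := by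
  intro hj
  rw [PySem.Chars.find_eq_neg_one_iff] at h
  exact h ((PySem.Chars.isIn_iff_infix S u).1
    ((PySem.Chars.exists_prefix_drop_iff_isIn S u).1 ⟨j, hj⟩))

lemma pv_find_neg {u S : List Char} (h : ∀ j, ¬ S <+: u.drop j) : PySem.Chars.find u S = -1 := by
  rw [PySem.Chars.find_eq_neg_one_iff]
  intro hinf
  obtain ⟨j, hj⟩ := (PySem.Chars.exists_prefix_drop_iff_isIn S u).2
    ((PySem.Chars.isIn_iff_infix S u).2 hinf)
  exact h j hj

lemma pv_find_eq_coe {u S : List Char} {n : Nat} (hocc : S <+: u.drop n)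
    (hmin : ∀ j < n, ¬ S <+: u.drop j) : PySem.Chars.find u S = (n : Int) := by
  have hinf : S <:+: u := (PySem.Chars.isIn_iff_infix S u).1
    ((PySem.Chars.exists_prefix_drop_iff_isIn S u).1 ⟨n, hocc⟩)
  have h0 : 0 ≤ PySem.Chars.find u S := (PySem.Chars.find_nonneg_iff u S).2 hinf
  obtain ⟨hs1, hs2⟩ := PySem.Chars.find_spec h0
  have ht : (PySem.Chars.find u S).toNat = n := by
    rcases Nat.lt_trichotomy (PySem.Chars.find u S).toNat n with h | h | h
    · exact absurd hs1 (hmin _ h)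
    · exact h
    · exact absurd hocc (hs2 _ h)
  omega

lemma pv_find_spec' {u S : List Char} {n : Nat} (h : PySem.Chars.find u S = (n : Int)) :
    S <+: u.drop n ∧ ∀ j < n, ¬ S <+: u.drop j := by
  have h0 : 0 ≤ PySem.Chars.find u S := by omega
  obtain ⟨hs1, hs2⟩ := PySem.Chars.find_spec h0
  rw [h] at hs1 hs2
  simpa using ⟨hs1, hs2⟩

lemma pv_find_cases (u S : List Char) :
    PySem.Chars.find u S = -1 ∨
      ∃ n : Nat, PySem.Chars.find u S = (n : Int) ∧ S <+: u.drop n ∧ ∀ j < n, ¬ S <+: u.drop j := by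
  by_cases h : 0 ≤ PySem.Chars.find u S
  · right
    refine ⟨(PySem.Chars.find u S).toNat, by omega, ?_⟩
    have := pv_find_spec' (u := u) (S := S) (n := (PySem.Chars.find u S).toNat) (by omega)
    exact this
  · left
    have := PySem.Chars.neg_one_le_find u S
    omega

lemma pv_find_drop_neg {u S : List Char} (k : Nat) (h : PySem.Chars.find u S = -1) :
    PySem.Chars.find (u.drop k) S = -1 := by
  apply pv_find_neg
  intro j hj
  rw [List.drop_drop] at hj
  exact pv_no_occ_of_neg h _ hj

lemma pv_find_of_shift {u S : List Char} {k n : Nat} (hk : k ≤ n)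
    (h : PySem.Chars.find u S = (n : Int)) :
    PySem.Chars.find (u.drop k) S = ((n - k : Nat) : Int) := by
  obtain ⟨hocc, hmin⟩ := pv_find_spec' h
  apply pv_find_eq_coe
  · rw [List.drop_drop]
    have : k + (n - k) = n := by omega
    rw [this]; exact hocc
  · intro j hj
    rw [List.drop_drop]
    exact hmin (k + j) (by omega)

-- ---- marker-specific character facts ----

lemma pv_stop_len : pvStop.length = 16 := by decide
lemma pv_start_len : pvStart.length = 17 := by decide

lemma pv_not_both_prefix {t : List Char} (hS : pvStop <+: t) (hT : pvStart <+: t) : False := by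
  have e1 : t[6]? = pvStop[6]? := pv_prefix_getElem? hS (by decide)
  have e2 : t[6]? = pvStart[6]? := pv_prefix_getElem? hT (by decide)
  rw [e1] at e2
  exact absurd e2 (by decide)

lemma pv_stop_no_lt : ∀ d < 16, 1 ≤ d → pvStop[d]? ≠ some '<' := by decide
lemma pv_start_no_lt : ∀ d < 17, 1 ≤ d → pvStart[d]? ≠ some '<' := by decide

lemma pv_len_geS {u : List Char} {a : Nat} (h : pvStop <+: u.drop a) : a + 16 ≤ u.length := by
  have h1 := h.length_le
  rw [List.length_drop, pv_stop_len] at h1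
  omega

lemma pv_len_geT {u : List Char} {a : Nat} (h : pvStart <+: u.drop a) : a + 17 ≤ u.length := by
  have h1 := h.length_le
  rw [List.length_drop, pv_start_len] at h1
  omega

lemma pv_disjoint {u : List Char} {a b : Nat} (hP : pvStop <+: u.drop a)
    (hQ : pvStart <+: u.drop b) : b + 17 ≤ a ∨ a + 16 ≤ b := by
  by_contra hcon
  push_neg at hcon
  obtain ⟨h1, h2⟩ := hcon
  rcases Nat.lt_trichotomy a b with hab | rfl | hab
  · -- a < b < a + 16 : stopindex would contain '<' at offset b - a
    have hd : b - a < 16 := by omega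
    have e1 : u[b]? = pvStart[0]? := by
      have := pv_prefix_getElem? hQ (i := 0) (by decide)
      simpa [List.getElem?_drop] using this
    have e2 : u[a + (b - a)]? = pvStop[b - a]? := by
      have := pv_prefix_getElem? hP (i := b - a) (by rw [pv_stop_len]; omega)
      simpa [List.getElem?_drop] using this
    have hab' : a + (b - a) = b := by omega
    rw [hab', e1] at e2
    exact pv_stop_no_lt (b - a) hd (by omega) (by rw [← e2]; decide)
  · exact pv_not_both_prefix hP hQ
  · -- b < a < b + 17 : startindex would contain '<' at offset a - b
    have hd : a - b < 17 := by omega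
    have e1 : u[a]? = pvStop[0]? := by
      have := pv_prefix_getElem? hP (i := 0) (by decide)
      simpa [List.getElem?_drop] using this
    have e2 : u[b + (a - b)]? = pvStart[a - b]? := by
      have := pv_prefix_getElem? hQ (i := a - b) (by rw [pv_start_len]; omega)
      simpa [List.getElem?_drop] using this
    have hab' : b + (a - b) = a := by omega
    rw [hab', e1] at e2
    exact pv_start_no_lt (a - b) hd (by omega) (by rw [← e2]; decide)

-- ---- the common specification: one pass keep/skip function ----

def pvF (t : List Char) : List Char :=
  if hn : PySem.Chars.find t pvStop < 0 then t
  else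
    if PySem.Chars.find (t.drop (PySem.Chars.find t pvStop).toNat) pvStart < 0 then
      t.take (PySem.Chars.find t pvStop).toNat
    else
      t.take (PySem.Chars.find t pvStop).toNat ++
        pvF ((t.drop (PySem.Chars.find t pvStop).toNat).drop
          (PySem.Chars.find (t.drop (PySem.Chars.find t pvStop).toNat) pvStart).toNat)
termination_by t.length
decreasing_by
  rename_i hm
  have h0 : 0 ≤ PySem.Chars.find t pvStop := by omega
  have h0' : 0 ≤ PySem.Chars.find (t.drop (PySem.Chars.find t pvStop).toNat) pvStart := by omega
  obtain ⟨hs1, -⟩ := PySem.Chars.find_spec h0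
  obtain ⟨ht1, -⟩ := PySem.Chars.find_spec h0'
  have hlen := pv_len_geS hs1
  rcases pv_disjoint hs1 (by rw [List.drop_drop] at ht1; exact ht1) with h | h
  · omega
  · simp only [List.length_drop]
    omega

def pvG (u : List Char) : List Char :=
  if PySem.Chars.find u pvStart < 0 then []
  else pvF (u.drop (PySem.Chars.find u pvStart).toNat)

lemma pvF_neg {t : List Char} (h : PySem.Chars.find t pvStop = -1) : pvF t = t := by
  rw [pvF]
  simp [h]

lemma pvF_pos {t : List Char} {n : Nat} (h : PySem.Chars.find t pvStop = (n : Int)) :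
    pvF t = t.take n ++ pvG (t.drop n) := by
  rw [pvF, pvG]
  have h0 : ¬ PySem.Chars.find t pvStop < 0 := by omega
  simp only [h, Int.toNat_natCast, dif_neg (by omega : ¬ ((n : Int) < 0))]
  split_ifs with hm
  · simp
  · rfl

lemma pvG_neg {u : List Char} (h : PySem.Chars.find u pvStart = -1) : pvG u = [] := by
  rw [pvG]; simp [h]

lemma pvG_pos {u : List Char} {m : Nat} (h : PySem.Chars.find u pvStart = (m : Int)) :
    pvG u = pvF (u.drop m) := by
  rw [pvG]
  simp [h]

-- Searching for startindex from the stop marker or from just past it is the same: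
-- no startindex occurrence can begin inside a stopindex occurrence.
lemma pvG_drop16 {v : List Char} (h : pvStop <+: v) : pvG v = pvG (v.drop 16) := by
  have h0 : pvStop <+: v.drop 0 := by simpa using h
  rcases pv_find_cases v pvStart with hneg | ⟨m, hm, hocc, hmin⟩
  · rw [pvG_neg hneg, pvG_neg (pv_find_drop_neg 16 hneg)]
  · have h16 : 16 ≤ m := by
      rcases pv_disjoint h0 hocc with h | h
      · omega
      · omega
    rw [pvG_pos hm, pvG_pos (pv_find_of_shift h16 hm), List.drop_drop]
    have hmm : 16 + (m - 16) = m := by omega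
    rw [hmm]

-- ---- Chars.join with empty separator is flatten ----

lemma pv_join_nil_eq (ps : List (List Char)) : PySem.Chars.join [] ps = ps.flatten := by
  induction ps with
  | nil => simp [PySem.Chars.join_nil]
  | cons p rest ih =>
    cases rest with
    | nil => simp [PySem.Chars.join_singleton]
    | cons q rest' =>
      rw [PySem.Chars.join_cons_cons]
      simp only [List.flatten_cons]
      rw [ih]
      simp

-- ---- A-side: the loop computes pvF / pvG ----

lemma pvLoopA_succ (L : List Char) (f : Nat) (state pos : Int) (res : List (List Char)) :
    pvLoopA L (f + 1) state pos res =
      (let nx : Int × Int :=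
        if state = 0 then (PySem.Chars.findFrom L pvStop pos, 1)
        else (PySem.Chars.findFrom L pvStart pos, 0)
      if 0 ≤ nx.1 then
        pvLoopA L f nx.2 nx.1
          (if state = 0 then res ++ [PySem.List.slice L (some pos) (some nx.1)] else res)
      else
        if pos = 0 then L
        else if state = 0 then PySem.Chars.join [] (res ++ [PySem.List.slice L (some pos) none])
        else PySem.Chars.join [] res) := rfl

lemma pv_loopA_main (L : List Char)
    (hD : pvStop <+: L → PySem.Chars.find L pvStart ≠ -1) :
    ∀ fuel : Nat,
      (∀ (pos : Nat) (res : List (List Char)), pos ≤ L.length →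
        2 * (L.length - pos) + 2 ≤ fuel → (pos = 0 → res = []) →
        pvLoopA L fuel 0 (pos : Int) res = PySem.Chars.join [] res ++ pvF (L.drop pos)) ∧
      (∀ (pos : Nat) (res : List (List Char)), pos ≤ L.length →
        2 * (L.length - pos) + 1 ≤ fuel → pvStop <+: L.drop pos →
        pvLoopA L fuel 1 (pos : Int) res = PySem.Chars.join [] res ++ pvG (L.drop pos)) := by
  intro fuel
  induction fuel using Nat.strong_induction_on with
  | _ fuel ih =>
    constructor
    · intro pos res hpos hfuel hres
      obtain ⟨f, rfl⟩ : ∃ f, fuel = f + 1 := ⟨fuel - 1, by omega⟩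
      simp only [pvLoopA]
      norm_num
      rw [PySem.Chars.findFrom_natCast L pvStop pos hpos]
      rcases pv_find_cases (L.drop pos) pvStop with hneg | ⟨k, hk, hocc, hmin⟩
      · rw [hneg]
        norm_num
        by_cases hp0 : pos = 0
        · subst hp0
          rw [hres rfl]
          simp only [List.drop_zero] at hneg ⊢
          simp [pvF_neg hneg]
        · rw [if_neg (by exact_mod_cast hp0)]
          rw [pv_join_nil_eq, pv_join_nil_eq, List.flatten_append]
          simp [pvF_neg hneg]
      · rw [hk]
        rw [if_neg (by omega : ¬ ((k : Int) = -1))]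
        rw [if_pos (by omega : (0 : Int) ≤ (pos : Int) + (k : Int))]
        have hcast : (pos : Int) + (k : Int) = ((pos + k : Nat) : Int) := by push_cast; ring
        rw [hcast]
        have hocc' : pvStop <+: L.drop (pos + k) := by
          rw [← List.drop_drop]; exact hocc
        have hlen := pv_len_geS hocc'
        rw [(ih f (by omega)).2 (pos + k)
          (res ++ [PySem.List.slice L (some (pos : Int)) (some ((pos + k : Nat) : Int))])
          (by omega) (by omega) hocc']
        rw [PySem.List.slice_natCast]
        rw [pv_join_nil_eq, pv_join_nil_eq, List.flatten_append]
        have hkk : pos + k - pos = k := by omega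
        rw [hkk]
        rw [pvF_pos hk, ← List.drop_drop]
        simp
    · intro pos res hpos hfuel hstop
      obtain ⟨f, rfl⟩ : ∃ f, fuel = f + 1 := ⟨fuel - 1, by omega⟩
      simp only [pvLoopA]
      norm_num
      rw [PySem.Chars.findFrom_natCast L pvStart pos hpos]
      rcases pv_find_cases (L.drop pos) pvStart with hneg | ⟨k, hk, hocc, hmin⟩
      · rw [hneg]
        norm_num
        have hp0 : pos ≠ 0 := by
          intro h0
          subst h0
          simp only [List.drop_zero] at hstop hneg
          exact hD hstop hneg
        rw [if_neg (by exact_mod_cast hp0)]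
        rw [pvG_neg hneg]
        simp
      · rw [hk]
        rw [if_neg (by omega : ¬ ((k : Int) = -1))]
        rw [if_pos (by omega : (0 : Int) ≤ (pos : Int) + (k : Int))]
        have hcast : (pos : Int) + (k : Int) = ((pos + k : Nat) : Int) := by push_cast; ring
        rw [hcast]
        have hocc' : pvStart <+: L.drop (pos + k) := by
          rw [← List.drop_drop]; exact hocc
        have hk1 : 1 ≤ k := by
          by_contra hk0
          have hk0' : k = 0 := by omega
          subst hk0'
          simp only [List.drop_zero] at hocc
          exact pv_not_both_prefix hstop hocc
        have hlen := pv_len_geT hocc'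
        rw [(ih f (by omega)).1 (pos + k) res (by omega) (by omega)
          (by intro h0; exact absurd h0 (by omega))]
        rw [pvG_pos hk, ← List.drop_drop]
  
lemma pvA_eq (content : String)
    (hD : pvStop <+: content.toList → PySem.Chars.find content.toList pvStart ≠ -1) :
    filter_stopindex content = String.ofList (pvF content.toList) := by
  unfold filter_stopindex
  have := (pv_loopA_main content.toList hD (2 * content.toList.length + 3)).1 0 []
    (by omega) (by omega) (fun _ => rfl)
  simp only [Nat.cast_zero] at this
  rw [this]
  simp [pv_join_nil_eq]

-- ---- B-side: splitOn characterisation ----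

def pvSplit (l cur : List Char) : List (List Char) :=
  match l with
  | [] => [cur.reverse]
  | c :: rest =>
    if pvStop.isPrefixOf (c :: rest) then
      cur.reverse :: pvSplit (List.drop 16 (c :: rest)) []
    else pvSplit rest (c :: cur)
termination_by l.length
decreasing_by
  · simp only [List.length_drop, List.length_cons]; omega
  · simp

lemma pv_go_eq : ∀ (fuel : Nat) (l cur : List Char) (acc : List (List Char)), l.length < fuel →
    PySem.Chars.splitOn.go pvStop fuel l cur acc = acc.reverse ++ pvSplit l cur := by
  intro fuel
  induction fuel with
  | zero => intro l cur acc h; omega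
  | succ f ihf =>
    intro l cur acc h
    cases l with
    | nil =>
      rw [pvSplit]
      simp [PySem.Chars.splitOn.go]
    | cons c rest =>
      rw [pvSplit]
      by_cases hpre : pvStop.isPrefixOf (c :: rest)
      · have hstep : PySem.Chars.splitOn.go pvStop (f + 1) (c :: rest) cur acc =
            PySem.Chars.splitOn.go pvStop f (List.drop pvStop.length (c :: rest)) []
              (cur.reverse :: acc) := by
          simp [PySem.Chars.splitOn.go, hpre]
        rw [hstep, ihf _ _ _ (by
          simp only [List.length_cons] at h
          simp only [List.length_drop, List.length_cons, pv_stop_len]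
          omega)]
        rw [if_pos hpre, pv_stop_len]
        simp
      · have hstep : PySem.Chars.splitOn.go pvStop (f + 1) (c :: rest) cur acc =
            PySem.Chars.splitOn.go pvStop f rest (c :: cur) acc := by
          simp [PySem.Chars.splitOn.go, hpre]
        rw [hstep, ihf _ _ _ (by simp only [List.length_cons] at h; omega)]
        rw [if_neg hpre]

lemma pv_splitOn_eq (l : List Char) : PySem.Chars.splitOn l pvStop = pvSplit l [] := by
  unfold PySem.Chars.splitOn
  rw [pv_go_eq (l.length + 1) l [] [] (by omega)]
  simp

lemma pv_find_cons {c : Char} {rest : List Char} (h : ¬ pvStop <+: (c :: rest)) :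
    PySem.Chars.find (c :: rest) pvStop =
      if PySem.Chars.find rest pvStop = -1 then -1 else PySem.Chars.find rest pvStop + 1 := by
  rcases pv_find_cases rest pvStop with hneg | ⟨n, hn, hocc, hmin⟩
  · rw [hneg, if_pos rfl]
    apply pv_find_neg
    intro j
    cases j with
    | zero => simpa using h
    | succ j =>
      have : (c :: rest).drop (j + 1) = rest.drop j := rfl
      rw [this]
      exact pv_no_occ_of_neg hneg j
  · rw [hn, if_neg (by omega)]
    have : (n : Int) + 1 = ((n + 1 : Nat) : Int) := by push_cast; ring
    rw [this]
    apply pv_find_eq_coe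
    · have : (c :: rest).drop (n + 1) = rest.drop n := rfl
      rw [this]; exact hocc
    · intro j hj
      cases j with
      | zero => simpa using h
      | succ j =>
        have : (c :: rest).drop (j + 1) = rest.drop j := rfl
        rw [this]
        exact hmin j (by omega)

lemma pvSplit_eq : ∀ (l cur : List Char), pvSplit l cur =
    if PySem.Chars.find l pvStop = -1 then [cur.reverse ++ l]
    else (cur.reverse ++ l.take (PySem.Chars.find l pvStop).toNat) ::
      pvSplit (l.drop ((PySem.Chars.find l pvStop).toNat + 16)) [] := by
  intro l
  induction l with
  | nil =>
    intro cur
    have : PySem.Chars.find ([] : List Char) pvStop = -1 := by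
      apply pv_find_neg
      intro j hj
      rw [List.drop_nil] at hj
      have := hj.length_le
      rw [pv_stop_len] at this
      simp at this
    rw [this]
    simp [pvSplit]
  | cons c rest ih =>
    intro cur
    rw [pvSplit]
    by_cases hpre : pvStop.isPrefixOf (c :: rest)
    · have hf : PySem.Chars.find (c :: rest) pvStop = ((0 : Nat) : Int) := by
        apply pv_find_eq_coe
        · simpa using List.isPrefixOf_iff_prefix.1 hpre
        · omega
      rw [if_pos hpre, hf]
      norm_num
    · have hnp : ¬ pvStop <+: (c :: rest) := fun hc => hpre (List.isPrefixOf_iff_prefix.2 hc)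
      rw [if_neg hpre, ih (c :: cur), pv_find_cons hnp]
      rcases pv_find_cases rest pvStop with hneg | ⟨n, hn, hocc, hmin⟩
      · rw [hneg]
        simp
      · rw [hn]
        have hif : (if (n : Int) = -1 then (-1 : Int) else (n : Int) + 1) = ((n + 1 : Nat) : Int) := by
          rw [if_neg (by omega)]; push_cast; ring
        rw [hif, if_neg (by omega : ¬ (((n + 1 : Nat) : Int) = -1))]
        simp only [Int.toNat_natCast]
        have ht : (c :: rest).take (n + 1) = c :: rest.take n := rfl
        have hd : (c :: rest).drop (n + 1 + 16) = rest.drop (n + 16) := rfl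
        rw [ht, hd]
        simp

lemma pv_splitOn_unfold (l : List Char) : PySem.Chars.splitOn l pvStop =
    if PySem.Chars.find l pvStop = -1 then [l]
    else l.take (PySem.Chars.find l pvStop).toNat ::
      PySem.Chars.splitOn (l.drop ((PySem.Chars.find l pvStop).toNat + 16)) pvStop := by
  rw [pv_splitOn_eq, pvSplit_eq]
  simp [pv_splitOn_eq]

-- ---- B-side: per-segment processing equals pvG ----

def pvSeg (p : List Char) : List Char :=
  if 0 ≤ PySem.Chars.find p pvStart then p.drop (PySem.Chars.find p pvStart).toNat else []

lemma pv_find_take_pos {u : List Char} {n m : Nat} (h : PySem.Chars.find u pvStart = (m : Int))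
    (hmn : m + 17 ≤ n) : PySem.Chars.find (u.take n) pvStart = (m : Int) := by
  obtain ⟨hocc, hmin⟩ := pv_find_spec' h
  apply pv_find_eq_coe
  · rw [List.drop_take, List.prefix_take_iff]
    exact ⟨hocc, by rw [pv_start_len]; omega⟩
  · intro j hj hc
    rw [List.drop_take, List.prefix_take_iff] at hc
    exact hmin j hj hc.1

lemma pv_find_take_neg {u : List Char} {n : Nat}
    (h : ∀ j, j + 17 ≤ n → ¬ pvStart <+: u.drop j) :
    PySem.Chars.find (u.take n) pvStart = -1 := by
  apply pv_find_neg
  intro j hj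
  rw [List.drop_take, List.prefix_take_iff] at hj
  obtain ⟨hj1, hj2⟩ := hj
  rw [pv_start_len] at hj2
  exact h j (by omega) hj1

lemma pv_K : ∀ (N : Nat) (u : List Char), u.length < N →
    ((PySem.Chars.splitOn u pvStop).map pvSeg).flatten = pvG u := by
  intro N
  induction N with
  | zero => intro u hu; omega
  | succ N ih =>
    intro u hu
    rcases pv_find_cases u pvStop with hnegS | ⟨n, hn, hoccS, hminS⟩
    · rw [pv_splitOn_unfold, if_pos hnegS]
      simp only [List.map_cons, List.map_nil, List.flatten_cons, List.flatten_nil,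
        List.append_nil]
      unfold pvSeg
      rcases pv_find_cases u pvStart with hnegT | ⟨m, hm, hoccT, hminT⟩
      · rw [hnegT, pvG_neg hnegT]
        norm_num
      · rw [hm, pvG_pos hm, Int.toNat_natCast, if_pos (by omega)]
        rw [pvF_neg (pv_find_drop_neg m hnegS)]
    · rw [pv_splitOn_unfold, hn, if_neg (by omega), Int.toNat_natCast]
      simp only [List.map_cons, List.flatten_cons]
      have hlenS := pv_len_geS hoccS
      rw [ih (u.drop (n + 16)) (by simp only [List.length_drop]; omega)]
      rcases pv_find_cases u pvStart with hnegT | ⟨m, hm, hoccT, hminT⟩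
      · -- no startindex anywhere
        rw [pvG_neg hnegT, pvG_neg (pv_find_drop_neg (n + 16) hnegT)]
        have : pvSeg (u.take n) = [] := by
          unfold pvSeg
          rw [pv_find_take_neg (fun j _ => pv_no_occ_of_neg hnegT j)]
          norm_num
        rw [this]
        simp
      · rcases pv_disjoint hoccS hoccT with hcase | hcase
        · -- first startindex lies inside the first (kept) segment: m + 17 ≤ n
          have hseg : pvSeg (u.take n) = (u.drop m).take (n - m) := by
            unfold pvSeg
            rw [pv_find_take_pos hm (by omega), if_pos (by omega), Int.toNat_natCast,
              List.drop_take]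
          rw [hseg, pvG_pos hm]
          have hfS : PySem.Chars.find (u.drop m) pvStop = ((n - m : Nat) : Int) := by
            apply pv_find_eq_coe
            · rw [List.drop_drop]
              have : m + (n - m) = n := by omega
              rw [this]; exact hoccS
            · intro j hj hc
              rw [List.drop_drop] at hc
              exact hminS (m + j) (by omega) hc
          rw [pvF_pos hfS, List.drop_drop]
          have hmn : m + (n - m) = n := by omega
          rw [hmn]
          rw [pvG_drop16 hoccS, List.drop_drop]
        · -- first startindex lies at or after the next stop marker: n + 16 ≤ m
          have hseg : pvSeg (u.take n) = [] := by
            unfold pvSeg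
            rw [pv_find_take_neg (fun j hj hc => hminT j (by omega) hc)]
            norm_num
          rw [hseg, pvG_pos hm]
          rw [pvG_pos (pv_find_of_shift (by omega : n + 16 ≤ m) hm), List.drop_drop]
          have : n + 16 + (m - (n + 16)) = m := by omega
          rw [this]
          simp

-- ---- B-side: the port computes pvF ----

lemma pv_fold_join (rest : List (List Char)) (acc : List (List Char)) :
    PySem.Chars.join []
      (rest.foldl (fun out p =>
        let i := PySem.Chars.find p pvStart
        if 0 ≤ i then out ++ [PySem.List.slice p (some i) none] else out) acc) =
    PySem.Chars.join [] acc ++ (rest.map pvSeg).flatten := by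
  induction rest generalizing acc with
  | nil => simp
  | cons p rest ih =>
    simp only [List.foldl_cons, List.map_cons, List.flatten_cons]
    rw [ih]
    by_cases hp : 0 ≤ PySem.Chars.find p pvStart
    · simp only [hp, if_pos]
      rw [PySem.List.slice_from p hp]
      rw [pv_join_nil_eq, pv_join_nil_eq, List.flatten_append]
      unfold pvSeg
      rw [if_pos hp]
      simp
    · rw [if_neg hp]
      unfold pvSeg
      rw [if_neg hp]
      simp

lemma pvB_eq (content : String) :
    filter_stopindex_alt content = String.ofList (pvF content.toList) := by
  unfold filter_stopindex_alt
  rcases pv_find_cases content.toList pvStop with hneg | ⟨n, hn, hocc, hmin⟩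
  · rw [pv_splitOn_unfold, if_pos hneg]
    simp only [List.foldl_nil]
    rw [PySem.Chars.join_singleton, pvF_neg hneg]
  · rw [pv_splitOn_unfold, hn, if_neg (by omega), Int.toNat_natCast]
    simp only []
    rw [pv_fold_join]
    rw [PySem.Chars.join_singleton]
    rw [pv_K ((content.toList.drop (n + 16)).length + 1) _ (by omega)]
    rw [pvF_pos hn, pvG_drop16 hocc, List.drop_drop]

-- ---- A under D_: the pos == 0 shortcut fires ----

lemma pvA_D (content : String)
    (h1 : PySem.Chars.startswith content.toList pvStop = true)
    (h2 : PySem.Chars.isIn pvStart content.toList = false) :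
    filter_stopindex content = content := by
  unfold filter_stopindex
  have hf1 : PySem.Chars.find content.toList pvStop = ((0 : Nat) : Int) := by
    apply pv_find_eq_coe
    · simpa using (PySem.Chars.startswith_iff content.toList pvStop).1 h1
    · omega
  have hf2 : PySem.Chars.find content.toList pvStart = -1 := by
    apply pv_find_neg
    intro j hj
    have : PySem.Chars.isIn pvStart content.toList = true :=
      (PySem.Chars.exists_prefix_drop_iff_isIn pvStart content.toList).1 ⟨j, hj⟩
    rw [this] at h2
    exact absurd h2 (by decide)
  obtain ⟨f, hf⟩ : ∃ f, 2 * content.toList.length + 3 = (f + 1) + 1 :=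
    ⟨2 * content.toList.length + 1, by omega⟩
  rw [hf, pvLoopA_succ]
  norm_num
  rw [hf1]
  norm_num
  rw [pvLoopA_succ]
  norm_num
  rw [hf2]
  norm_num

-- ===== VERDICT (by name: the statement is the Claim_ definition above) =====
theorem filter_stopindex_spec : Claim_unchanged_filter_stopindex := by
  intro content _ hnD
  show filter_stopindex content = filter_stopindex_alt content
  have hD : pvStop <+: content.toList → PySem.Chars.find content.toList pvStart ≠ -1 := by
    intro hpre hfind
    apply hnD
    constructor
    · exact (PySem.Chars.startswith_iff content.toList pvStop).2 hpre
    · have hni : ¬ pvStart <:+: content.toList :=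
        (PySem.Chars.find_eq_neg_one_iff content.toList pvStart).1 hfind
      rcases hb : PySem.Chars.isIn pvStart content.toList with _ | _
      · rfl
      · exact absurd ((PySem.Chars.isIn_iff_infix pvStart content.toList).1 hb) hni
  rw [pvA_eq content hD, pvB_eq]

theorem filter_stopindex_changed : Claim_changed_filter_stopindex := by
  unfold Claim_changed_filter_stopindex
  decide

theorem filter_stopindex_tight : Claim_exact_filter_stopindex := by
  intro content _ hd
  obtain ⟨h1, h2⟩ := hd
  rw [pvA_D content h1 h2, pvB_eq]
  have hf1 : PySem.Chars.find content.toList pvStop = ((0 : Nat) : Int) := by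
    apply pv_find_eq_coe
    · simpa using (PySem.Chars.startswith_iff content.toList pvStop).1 h1
    · omega
  have hf2 : PySem.Chars.find content.toList pvStart = -1 := by
    apply pv_find_neg
    intro j hj
    have : PySem.Chars.isIn pvStart content.toList = true :=
      (PySem.Chars.exists_prefix_drop_iff_isIn pvStart content.toList).1 ⟨j, hj⟩
    rw [this] at h2
    exact absurd h2 (by decide)
  have hFe : pvF content.toList = [] := by
    rw [pvF_pos hf1]
    simp only [List.take_zero, List.drop_zero, List.nil_append]
    exact pvG_neg hf2
  rw [hFe]
  intro hc
  have hpre := (PySem.Chars.startswith_iff content.toList pvStop).1 h1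
  have hlen := hpre.length_le
  rw [pv_stop_len] at hlen
  have : content.toList = [] := by
    rw [hc]
    exact String.toList_ofList
  rw [this] at hlen
  simp at hlen
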